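-- pv_equiv track=rewrite | github.com/Hsbtqemy/LingWhistX | whisperx/annotation_imports.py | _parse_text_value_long
-- ===== SOURCE A (Python) =====
-- def _parse_text_value_long(
--     lines: list[str], i: int, warnings: list[str]
-- ) -> tuple[str, int]:
--     """
--     Parse a 'text = "..."' or 'mark = "..."' value that may span multiple lines.
--     Returns (text_content, next_line_index).
--     Praat uses "" to escape a literal " inside the value.
--     """
--     line = lines[i]
--     eq_pos = line.find("=")
--     if eq_pos < 0:
--         return "", i + 1
--
--     after_eq = line[eq_pos + 1 :].strip()
--
--     if not after_eq.startswith('"'):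
--         # Unquoted (rare but possible for numbers)
--         return after_eq, i + 1
--
--     # Strip opening quote and try to read the full value
--     accumulated = after_eq[1:]  # drop opening "
--     n = len(lines)
--
--     while True:
--         text, complete = _consume_quoted(accumulated)
--         if complete:
--             return text, i + 1
--         # Value continues on the next line
--         i += 1
--         if i >= n:
--             warnings.append("Reached end of file inside a quoted text value")
--             return accumulated.replace('""', '"'), i
--         accumulated += "\n" + lines[i]
--
-- def _consume_quoted(s: str) -> tuple[str, bool]:
--     """
--     Consume quoted content up to an unescaped closing '"'.
--     Returns (text_without_outer_quotes, is_complete).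
--     '""' inside the content is decoded as a literal '"'.
--     """
--     result: list[str] = []
--     pos = 0
--     while pos < len(s):
--         c = s[pos]
--         if c == '"':
--             if pos + 1 < len(s) and s[pos + 1] == '"':
--                 result.append('"')
--                 pos += 2
--             else:
--                 return "".join(result), True
--         else:
--             result.append(c)
--             pos += 1
--     return "".join(result), False
-- ===== SOURCE B (Python) =====
-- def _parse_text_value_long(
--     lines: list[str], i: int, warnings: list[str]
-- ) -> tuple[str, int]:
--     """
--     Same return value as A (and the same warnings append at EOF), but computed
--     by a different algorithm: join the candidate value text ONCE, decode it in
--     a single scan that stops at the first unescaped closing quote, and map the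
--     quote's position back to a line index through the separator offsets.
--     """
--     line = lines[i]
--     eq_pos = line.find("=")
--     if eq_pos < 0:
--         return "", i + 1
--
--     after_eq = line[eq_pos + 1 :].strip()
--
--     if not after_eq.startswith('"'):
--         return after_eq, i + 1
--
--     n = len(lines)
--     rest = [lines[k] for k in range(i + 1, n)]
--     joined = "\n".join([after_eq[1:]] + rest)
--
--     # single decoding scan for the first unescaped '"'
--     out = []
--     p = 0
--     L = len(joined)
--     close = -1
--     while p < L:
--         c = joined[p]
--         if c != '"':
--             out.append(c)
--             p += 1
--         elif p + 1 < L and joined[p + 1] == '"':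
--             out.append('"')
--             p += 2
--         else:
--             close = p
--             break
--     text = "".join(out)
--
--     if close < 0:
--         warnings.append("Reached end of file inside a quoted text value")
--         return text, n
--
--     # which line does the closing quote sit on? count separators before it
--     b = len(after_eq) - 1  # position of the first separator '\n' in joined
--     m = 0
--     for ln in rest:
--         if b < close:
--             m += 1
--             b += 1 + len(ln)
--         else:
--             break
--     return text, i + 1 + m
-- ===== Notes on version B (the rewrite author's own statement) =====
-- stated objective: alternative
-- what changed: B joins the candidate value text once, decodes it in a single scan that stops at the first unescaped closing quote, and maps that position back to a line index via the separator offsets, instead of A's loop that re-runs _consume_quoted over the whole growing accumulated string after every continuation line with a final replace() pass at EOF.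
import Mathlib
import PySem

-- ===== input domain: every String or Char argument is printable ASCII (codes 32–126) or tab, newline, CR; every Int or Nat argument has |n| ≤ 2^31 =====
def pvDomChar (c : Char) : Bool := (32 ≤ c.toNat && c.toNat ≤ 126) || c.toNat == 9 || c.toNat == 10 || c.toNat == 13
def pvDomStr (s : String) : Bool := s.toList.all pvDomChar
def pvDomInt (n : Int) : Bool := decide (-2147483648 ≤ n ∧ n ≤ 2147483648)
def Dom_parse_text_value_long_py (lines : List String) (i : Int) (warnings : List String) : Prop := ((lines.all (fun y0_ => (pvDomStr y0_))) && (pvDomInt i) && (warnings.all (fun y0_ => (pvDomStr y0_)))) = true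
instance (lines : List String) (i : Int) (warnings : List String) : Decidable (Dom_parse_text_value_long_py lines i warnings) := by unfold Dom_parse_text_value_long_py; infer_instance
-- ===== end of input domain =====

-- B joins the whole candidate value text once and decodes it in ONE scan, mapping the
-- closing quote's position back to a line index through the separator offsets, where A
-- re-runs _consume_quoted over the growing accumulated string after every line; same
-- return value, and both Pythons append the same warning string to `warnings`, a side
-- effect not captured by the returned pair.

-- ===== PORT A =====

-- A's helper _consume_quoted: scan s, '""' decodes to '"', a lone '"' completes.
def consumeQuoted : List Char → List Char × Bool
  | [] => ([], false)
  | c :: rest =>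
    if c = '"' then
      match rest with
      | '"' :: rest2 =>
        let r := consumeQuoted rest2
        ('"' :: r.1, r.2)
      | _ => ([], true)
    else
      let r := consumeQuoted rest
      (c :: r.1, r.2)

-- A's `while True` loop: re-run _consume_quoted on the whole accumulated string each round.
def parseLoopA (lines : List String) (n : Int) (acc : List Char) (i : Int) : String × Int :=
  let r := consumeQuoted acc
  if r.2 then (String.mk r.1, i + 1)
  else if _h : i + 1 ≥ n then
    (String.mk (PySem.Chars.replace acc ['"', '"'] ['"']), i + 1)
  else
    parseLoopA lines n (acc ++ '\n' :: ((PySem.List.pyGet? lines (i + 1)).getD "").toList) (i + 1)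
termination_by (n - i).toNat
decreasing_by omega

def parse_text_value_long_py (lines : List String) (i : Int) (warnings : List String) : String × Int :=
  let line := ((PySem.List.pyGet? lines i).getD "").toList
  let eqPos := PySem.Chars.find line ['=']
  if eqPos < 0 then ("", i + 1)
  else
    let afterEq := PySem.Chars.strip (PySem.List.slice line (some (eqPos + 1)) none)
    if ¬ PySem.Chars.startswith afterEq ['"'] then (String.mk afterEq, i + 1)
    else
      parseLoopA lines (lines.length : Int) (PySem.List.slice afterEq (some 1) none) i

-- ===== PORT B =====

-- Source B's "\n".join([chunk] + rest), as the tail appended after the chunk.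
def joinTail (rest : List String) : List Char :=
  rest.foldr (fun l acc => '\n' :: (l.toList ++ acc)) []

-- Source B's single decoding scan: (decoded text, position of the closing quote if any).
def scanJoin : List Char → List Char × Option Nat
  | [] => ([], none)
  | c :: rest =>
    if c ≠ '"' then
      let r := scanJoin rest
      (c :: r.1, r.2.map (· + 1))
    else
      match rest with
      | '"' :: rest2 =>
        let r := scanJoin rest2
        ('"' :: r.1, r.2.map (· + 2))
      | _ => ([], some 0)

-- Source B's `for ln in rest` offset walk: how many separators sit before position `close`.
def countSep (b : Nat) (close : Nat) : List String → Nat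
  | [] => 0
  | ln :: rest => if b < close then 1 + countSep (b + 1 + ln.toList.length) close rest else 0

def parse_text_value_long_py_alt (lines : List String) (i : Int) (warnings : List String) : String × Int :=
  let line := ((PySem.List.pyGet? lines i).getD "").toList
  let eqPos := PySem.Chars.find line ['=']
  if eqPos < 0 then ("", i + 1)
  else
    let afterEq := PySem.Chars.strip (PySem.List.slice line (some (eqPos + 1)) none)
    if ¬ PySem.Chars.startswith afterEq ['"'] then (String.mk afterEq, i + 1)
    else
      let chunk := PySem.List.slice afterEq (some 1) none
      let n : Int := (lines.length : Int)
      let rest := (PySem.List.pyRange (i + 1) n 1).map (fun k => (PySem.List.pyGet? lines k).getD "")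
      let r := scanJoin (chunk ++ joinTail rest)
      match r.2 with
      | none => (String.mk r.1, n)
      | some p => (String.mk r.1, i + 1 + (countSep chunk.length p rest : Int))

-- ===== PRECONDITION & SPEC =====
-- Pre_ excludes exactly the inputs where Python A raises IndexError on lines[i].
def Pre_parse_text_value_long_py (lines : List String) (i : Int) (warnings : List String) : Prop :=
  PySem.Raise.InRange lines.length i
instance (lines : List String) (i : Int) (warnings : List String) : Decidable (Pre_parse_text_value_long_py lines i warnings) := by unfold Pre_parse_text_value_long_py; infer_instance

def pvWitness_parse_text_value_long_py : List String × Int × List String :=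
  (["text = \"ab\"\"c", "tail\"", "next"], 0, [])

def Spec_parse_text_value_long_py (lines : List String) (i : Int) (warnings : List String) (out : String × Int) : Prop := out = parse_text_value_long_py_alt lines i warnings
instance (lines : List String) (i : Int) (warnings : List String) (out : String × Int) : Decidable (Spec_parse_text_value_long_py lines i warnings out) := by unfold Spec_parse_text_value_long_py; infer_instance

-- ===== CLAIM (what is proved, stated in full; the proofs are below) =====
def Claim_equal_parse_text_value_long_py : Prop := ∀ (lines : List String) (i : Int) (warnings : List String), Dom_parse_text_value_long_py lines i warnings → Pre_parse_text_value_long_py lines i warnings → Spec_parse_text_value_long_py lines i warnings (parse_text_value_long_py lines i warnings)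

-- ===== LEMMAS AND PROOFS =====

-- unfolding equations for A's scanner
theorem cq_nil : consumeQuoted [] = ([], false) := rfl
theorem cq_ne (c : Char) (t : List Char) (h : c ≠ '"') :
    consumeQuoted (c :: t) = (c :: (consumeQuoted t).1, (consumeQuoted t).2) := by
  rw [consumeQuoted.eq_def]; simp [h]
theorem cq_esc (t : List Char) :
    consumeQuoted ('"' :: '"' :: t) = ('"' :: (consumeQuoted t).1, (consumeQuoted t).2) := by
  rw [consumeQuoted.eq_def]; simp
theorem cq_close_nil : consumeQuoted ['"'] = ([], true) := by
  rw [consumeQuoted.eq_def]; simp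
theorem cq_close (d : Char) (t : List Char) (h : d ≠ '"') :
    consumeQuoted ('"' :: d :: t) = ([], true) := by
  rw [consumeQuoted.eq_def]; simp [h]

-- unfolding equations for B's scanner
theorem sj_nil : scanJoin [] = ([], none) := rfl
theorem sj_ne (c : Char) (t : List Char) (h : c ≠ '"') :
    scanJoin (c :: t) = (c :: (scanJoin t).1, (scanJoin t).2.map (· + 1)) := by
  rw [scanJoin.eq_def]; simp [h]
theorem sj_esc (t : List Char) :
    scanJoin ('"' :: '"' :: t) = ('"' :: (scanJoin t).1, (scanJoin t).2.map (· + 2)) := by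
  rw [scanJoin.eq_def]; simp
theorem sj_close_nil : scanJoin ['"'] = ([], some 0) := by
  rw [scanJoin.eq_def]; simp
theorem sj_close (d : Char) (t : List Char) (h : d ≠ '"') :
    scanJoin ('"' :: d :: t) = ([], some 0) := by
  rw [scanJoin.eq_def]; simp [h]

-- A's scanner computes the same text; completeness = B's scanner found a position.
theorem cq_eq_sj (s : List Char) :
    consumeQuoted s = ((scanJoin s).1, (scanJoin s).2.isSome) := by
  induction s using consumeQuoted.induct with
  | case1 => simp [cq_nil, sj_nil]
  | case2 rest2 ih =>
    rw [cq_esc, sj_esc, ih]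
    cases (scanJoin rest2).2 <;> simp
  | case3 rest hne =>
    match rest, hne with
    | [], _ => rw [cq_close_nil, sj_close_nil]; rfl
    | d :: rest2, hne =>
      have hd : d ≠ '"' := fun hdq => hne rest2 (by rw [hdq])
      rw [cq_close d rest2 hd, sj_close d rest2 hd]; rfl
  | case4 c rest h ih =>
    rw [cq_ne c rest h, sj_ne c rest h, ih]
    cases (scanJoin rest).2 <;> simp

-- the closing-quote position is inside the string
theorem sj_pos_lt (s : List Char) : ∀ p, (scanJoin s).2 = some p → p < s.length := by
  induction s using consumeQuoted.induct with
  | case1 => intro p hp; simp [sj_nil] at hp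
  | case2 rest2 ih =>
    intro p hp
    rw [sj_esc] at hp
    cases hq : (scanJoin rest2).2 with
    | none => rw [hq] at hp; simp at hp
    | some q =>
      rw [hq] at hp; simp at hp
      have := ih q hq
      simp; omega
  | case3 rest hne =>
    intro p hp
    match rest, hne with
    | [], _ => rw [sj_close_nil] at hp; simp at hp; simp; omega
    | d :: rest2, hne =>
      have hd : d ≠ '"' := fun hdq => hne rest2 (by rw [hdq])
      rw [sj_close d rest2 hd] at hp; simp at hp; simp; omega
  | case4 c rest h ih =>
    intro p hp
    rw [sj_ne c rest h] at hp
    cases hq : (scanJoin rest).2 with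
    | none => rw [hq] at hp; simp at hp
    | some q =>
      rw [hq] at hp; simp at hp
      have := ih q hq
      simp; omega

-- once the scan has closed, appending anything not starting with '"' changes nothing
theorem sj_complete_append (s : List Char) :
    ∀ (t : List Char) (p : Nat), (scanJoin s).2 = some p → t.head? ≠ some '"' →
    scanJoin (s ++ t) = scanJoin s := by
  induction s using consumeQuoted.induct with
  | case1 => intro t p hp _; simp [sj_nil] at hp
  | case2 rest2 ih =>
    intro t p hp ht
    rw [sj_esc] at hp ⊢
    cases hq : (scanJoin rest2).2 with
    | none => rw [hq] at hp; simp at hp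
    | some q =>
      have hthis : scanJoin (rest2 ++ t) = scanJoin rest2 := ih t q hq ht
      simp only [List.cons_append, sj_esc, hthis]
      rw [hq]
  | case3 rest hne =>
    intro t p hp ht
    match rest, hne with
    | [], _ =>
      match t, ht with
      | [], _ => simp
      | u :: t', ht =>
        have hu : u ≠ '"' := by simpa using ht
        show scanJoin ('"' :: u :: t') = scanJoin ['"']
        rw [sj_close u t' hu, sj_close_nil]
    | d :: rest2, hne =>
      have hd : d ≠ '"' := fun hdq => hne rest2 (by rw [hdq])
      show scanJoin ('"' :: d :: (rest2 ++ t)) = scanJoin ('"' :: d :: rest2)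
      rw [sj_close d (rest2 ++ t) hd, sj_close d rest2 hd]
  | case4 c rest h ih =>
    intro t p hp ht
    rw [sj_ne c rest h] at hp ⊢
    cases hq : (scanJoin rest).2 with
    | none => rw [hq] at hp; simp at hp
    | some q =>
      have hthis : scanJoin (rest ++ t) = scanJoin rest := ih t q hq ht
      simp only [List.cons_append, sj_ne _ _ h, hthis]
      rw [hq]

-- past an incompletely-quoted prefix, the scan continues in the suffix (shifted)
theorem sj_incomplete_append (s : List Char) :
    ∀ (t : List Char), (scanJoin s).2 = none →
    scanJoin (s ++ t) = ((scanJoin s).1 ++ (scanJoin t).1, (scanJoin t).2.map (fun q => s.length + q)) := by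
  induction s using consumeQuoted.induct with
  | case1 =>
    intro t _
    simp [sj_nil]
  | case2 rest2 ih =>
    intro t hp
    rw [sj_esc] at hp
    cases hq : (scanJoin rest2).2 with
    | some q => rw [hq] at hp; simp at hp
    | none =>
      have hrec := ih t hq
      simp only [List.cons_append, sj_esc, hrec]
      cases htq : (scanJoin t).2 with
      | none => simp
      | some q2 => simp; omega
  | case3 rest hne =>
    intro t hp
    match rest, hne with
    | [], _ => rw [sj_close_nil] at hp; simp at hp
    | d :: rest2, hne =>
      have hd : d ≠ '"' := fun hdq => hne rest2 (by rw [hdq])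
      rw [sj_close d rest2 hd] at hp; simp at hp
  | case4 c rest h ih =>
    intro t hp
    rw [sj_ne c rest h] at hp
    cases hq : (scanJoin rest).2 with
    | some q => rw [hq] at hp; simp at hp
    | none =>
      have hrec := ih t hq
      simp only [List.cons_append, sj_ne _ _ h, hrec]
      cases htq : (scanJoin t).2 with
      | none => simp
      | some q2 => simp; omega

-- Python's s.replace('""', '"') equals A's scanner output when the scan is incomplete.
theorem replaceGo_eq (s : List Char) : ∀ (fuel : Nat) (acc : List Char),
    s.length ≤ fuel → (consumeQuoted s).2 = false →
    PySem.Chars.replace.go ['"', '"'] ['"'] fuel s acc = acc.reverse ++ (consumeQuoted s).1 := by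
  induction s using consumeQuoted.induct with
  | case1 =>
    intro fuel acc _ _
    match fuel with
    | 0 => simp [PySem.Chars.replace.go, cq_nil]
    | fuel + 1 => simp [PySem.Chars.replace.go, cq_nil]
  | case2 rest2 ih =>
    intro fuel acc hlen hinc
    rw [cq_esc] at hinc ⊢
    match fuel with
    | 0 => simp at hlen
    | fuel + 1 =>
      simp only [PySem.Chars.replace.go]
      rw [if_pos (by simp [List.isPrefixOf])]
      have := ih fuel ('"' :: acc) (by simp at hlen ⊢; omega) hinc
      simp only [List.length_cons, List.drop_succ_cons] at this ⊢
      simp [this]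
  | case3 rest hne =>
    intro fuel acc hlen hinc
    match rest, hne with
    | [], _ => rw [cq_close_nil] at hinc; simp at hinc
    | d :: rest2, hne =>
      have hd : d ≠ '"' := fun hdq => hne rest2 (by rw [hdq])
      rw [cq_close d rest2 hd] at hinc; simp at hinc
  | case4 c rest h ih =>
    intro fuel acc hlen hinc
    rw [cq_ne c rest h] at hinc ⊢
    match fuel with
    | 0 => simp at hlen
    | fuel + 1 =>
      simp only [PySem.Chars.replace.go]
      rw [if_neg (by
        simp only [List.isPrefixOf_iff_prefix]
        intro hpre
        obtain ⟨u, hu⟩ := hpre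
        cases hu
        exact h rfl)]
      have := ih fuel (c :: acc) (by simp at hlen ⊢; omega) (by simpa using hinc)
      simp [this]

theorem replace_eq (s : List Char) (hinc : (consumeQuoted s).2 = false) :
    PySem.Chars.replace s ['"', '"'] ['"'] = (consumeQuoted s).1 := by
  have := replaceGo_eq s s.length [] (by omega) hinc
  simpa [PySem.Chars.replace] using this

-- the joined tail never starts with a quote (it is empty or starts with the separator)
theorem joinTail_head (rest : List String) : (joinTail rest).head? ≠ some '"' := by
  cases rest <;> simp [joinTail]

-- if the close position is not past b, no separator is counted
theorem countSep_zero (rest : List String) (b p : Nat) (h : ¬ b < p) :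
    countSep b p rest = 0 := by
  cases rest <;> simp [countSep, h]

-- main loop equivalence: A's round-by-round loop equals B's single scan of the join
theorem loop_eq (lines : List String) (n : Int) (hn : n = (lines.length : Int)) :
    ∀ (j : Nat) (i : Int), (n - i).toNat = j → i < n →
    ∀ (acc : List Char),
    parseLoopA lines n acc i =
      (let rest := (PySem.List.pyRange (i + 1) n 1).map (fun k => (PySem.List.pyGet? lines k).getD "")
       let r := scanJoin (acc ++ joinTail rest)
       match r.2 with
       | none => (String.mk r.1, n)
       | some p => (String.mk r.1, i + 1 + (countSep acc.length p rest : Int))) := by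
  intro j
  induction j using Nat.strong_induction_on with
  | _ j ih =>
    intro i hj hi acc
    rw [parseLoopA]
    simp only [cq_eq_sj acc]
    cases hscan : (scanJoin acc).2 with
    | some p =>
      -- A's round completes; the whole-join scan stops at the same place
      have hlt := sj_pos_lt acc p hscan
      have hfix := sj_complete_append acc (joinTail ((PySem.List.pyRange (i + 1) n 1).map (fun k => (PySem.List.pyGet? lines k).getD ""))) p hscan (joinTail_head _)
      simp only [hscan, Option.isSome_some, if_true, hfix, hscan,
        countSep_zero _ _ _ (by omega : ¬ acc.length < p)]
      simp
    | none =>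
      simp only [hscan, Option.isSome_none, Bool.false_eq_true, if_false]
      by_cases hend : i + 1 ≥ n
      · -- EOF: the range is empty, the join is acc itself, still incomplete
        have hrest : PySem.List.pyRange (i + 1) n 1 = [] := PySem.List.pyRange_one_eq_nil (by omega)
        rw [dif_pos hend]
        have hinc : (consumeQuoted acc).2 = false := by rw [cq_eq_sj, hscan]; rfl
        have htext : (consumeQuoted acc).1 = (scanJoin acc).1 := by rw [cq_eq_sj]
        simp only [hrest, List.map_nil, joinTail, List.foldr_nil, List.append_nil, hscan,
          replace_eq acc hinc, htext]
        have : i + 1 = n := by omega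
        rw [this]
      · -- continue: peel one line off the range and use the IH at i+1
        rw [dif_neg hend]
        have hcons : PySem.List.pyRange (i + 1) n 1 = (i + 1) :: PySem.List.pyRange (i + 1 + 1) n 1 :=
          PySem.List.pyRange_one_cons (by omega)
        set nextline := ((PySem.List.pyGet? lines (i + 1)).getD "").toList with hnext
        have hrec := ih ((n - (i + 1)).toNat) (by omega) (i + 1) rfl (by omega)
          (acc ++ '\n' :: nextline)
        rw [hrec]
        have hjoin : (acc ++ '\n' :: nextline) ++
            joinTail ((PySem.List.pyRange (i + 1 + 1) n 1).map (fun k => (PySem.List.pyGet? lines k).getD "")) =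
            acc ++ joinTail ((PySem.List.pyRange (i + 1) n 1).map (fun k => (PySem.List.pyGet? lines k).getD "")) := by
          rw [hcons]
          simp [joinTail, hnext]
        simp only [hjoin]
        -- the close position (if any) lies strictly past acc
        cases hbig : (scanJoin (acc ++ joinTail ((PySem.List.pyRange (i + 1) n 1).map (fun k => (PySem.List.pyGet? lines k).getD "")))).2 with
        | none => simp [hbig]
        | some p =>
          have hshift := sj_incomplete_append acc (joinTail ((PySem.List.pyRange (i + 1) n 1).map (fun k => (PySem.List.pyGet? lines k).getD ""))) hscan
          have hp_gt : acc.length < p := by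
            rw [hshift] at hbig
            simp only at hbig
            cases hq : (scanJoin (joinTail ((PySem.List.pyRange (i + 1) n 1).map (fun k => (PySem.List.pyGet? lines k).getD "")))).2 with
            | none => rw [hq] at hbig; simp at hbig
            | some q =>
              rw [hq] at hbig; simp at hbig
              -- the tail starts with '\n', so the inner position q is ≥ 1
              have : 1 ≤ q := by
                rw [hcons] at hq
                simp only [List.map_cons, joinTail, List.foldr_cons] at hq
                rw [show ('\n' :: (((PySem.List.pyGet? lines (i+1)).getD "").toList ++ List.foldr (fun l acc => '\n' :: (l.toList ++ acc)) [] ((PySem.List.pyRange (i + 1 + 1) n 1).map (fun k => (PySem.List.pyGet? lines k).getD "")))) = '\n' :: (((PySem.List.pyGet? lines (i+1)).getD "").toList ++ joinTail ((PySem.List.pyRange (i + 1 + 1) n 1).map (fun k => (PySem.List.pyGet? lines k).getD ""))) from rfl] at hq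
                rw [sj_ne '\n' _ (by decide)] at hq
                simp only at hq
                cases hq2 : (scanJoin (((PySem.List.pyGet? lines (i+1)).getD "").toList ++ joinTail ((PySem.List.pyRange (i + 1 + 1) n 1).map (fun k => (PySem.List.pyGet? lines k).getD "")))).2 with
                | none => rw [hq2] at hq; simp at hq
                | some q2 => rw [hq2] at hq; simp at hq; omega
              omega
          have hcount : countSep acc.length p ((PySem.List.pyRange (i + 1) n 1).map (fun k => (PySem.List.pyGet? lines k).getD "")) =
              1 + countSep (acc.length + 1 + nextline.length) p ((PySem.List.pyRange (i + 1 + 1) n 1).map (fun k => (PySem.List.pyGet? lines k).getD "")) := by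
            rw [hcons]
            simp [countSep, hp_gt, hnext]
          simp only [hbig, hcount]
          have hlen : (acc ++ '\n' :: nextline).length = acc.length + 1 + nextline.length := by
            simp; omega
          rw [hlen]
          simp only [Prod.mk.injEq]
          refine ⟨trivial, by push_cast; ring⟩

-- ===== VERDICT (by name: the statement is the Claim_ definition above) =====
theorem parse_text_value_long_py_spec : Claim_equal_parse_text_value_long_py := by
  intro lines i warnings _ hpre
  unfold Spec_parse_text_value_long_py
  unfold parse_text_value_long_py parse_text_value_long_py_alt
  simp only []
  by_cases h1 : PySem.Chars.find ((PySem.List.pyGet? lines i).getD "").toList ['='] < 0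
  · simp [h1]
  · simp only [if_neg h1]
    by_cases h2 : PySem.Chars.startswith (PySem.Chars.strip (PySem.List.slice ((PySem.List.pyGet? lines i).getD "").toList (some (PySem.Chars.find ((PySem.List.pyGet? lines i).getD "").toList ['='] + 1)) none)) ['"']
    · simp only [h2, not_true]
      have hi : i < (lines.length : Int) := hpre.2
      rw [loop_eq lines (lines.length : Int) rfl (((lines.length : Int) - i).toNat) i rfl hi]
    · simp [h2]
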